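-- pv_equiv track=rewrite | github.com/pavelcerny/naviterier-dp | gpsLocalization/functions.py | _uniteLastWithFirst
-- ===== SOURCE A (Python) =====
-- def _uniteLastWithFirst(startLabel, endLabel, labels):
--     n = len(labels)
--     for i in reversed(range(n)):
--         if labels[i] == endLabel:
--             labels[i] = startLabel
--         else:
--             break
--     return  labels
-- ===== SOURCE B (Python) =====
-- def _uniteLastWithFirst(startLabel, endLabel, labels):
--     boundary = 0
--     for j, x in enumerate(labels):
--         if x != endLabel:
--             boundary = j + 1
--     labels[boundary:] = [startLabel] * (len(labels) - boundary)
--     return labels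
-- ===== Notes on version B (the rewrite author's own statement) =====
-- stated objective: alternative
-- what changed: B does one forward pass with enumerate tracking the index just past the last non-endLabel element (no backward scan, no early break), then replaces the whole suffix with a single bulk slice assignment, instead of A's backward element-by-element rewrite loop.
import Mathlib
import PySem

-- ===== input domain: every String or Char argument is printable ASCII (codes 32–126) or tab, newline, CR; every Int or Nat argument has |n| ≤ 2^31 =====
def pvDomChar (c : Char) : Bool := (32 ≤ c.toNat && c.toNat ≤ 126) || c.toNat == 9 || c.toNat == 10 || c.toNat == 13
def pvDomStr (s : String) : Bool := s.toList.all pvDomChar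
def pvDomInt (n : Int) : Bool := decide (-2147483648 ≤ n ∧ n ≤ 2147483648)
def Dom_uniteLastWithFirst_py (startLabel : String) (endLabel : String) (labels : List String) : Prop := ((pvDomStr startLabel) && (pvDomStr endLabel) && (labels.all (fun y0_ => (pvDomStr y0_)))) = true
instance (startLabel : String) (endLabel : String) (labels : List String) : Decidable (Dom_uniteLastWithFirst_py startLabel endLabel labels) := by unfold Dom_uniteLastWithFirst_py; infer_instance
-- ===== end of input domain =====

-- B replaces A's backward break-loop rewrite by one forward enumerate pass that tracks the
-- index just past the last non-endLabel element, followed by a single bulk suffix replacement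
-- (objective: alternative). Both Pythons mutate `labels` in place; the equivalence proved here
-- is about the return value.

-- ===== PORT A =====
-- A's loop `for i in reversed(range(n))`: i runs n-1, …, 0; set labels[i] := startLabel while it equals endLabel, else break.
def aGo (startLabel : String) (endLabel : String) : Nat → List String → List String
  | 0, ls => ls
  | (k+1), ls => if ls.getD k "" = endLabel then aGo startLabel endLabel k (ls.set k startLabel) else ls

def uniteLastWithFirst_py (startLabel : String) (endLabel : String) (labels : List String) : List String :=
  aGo startLabel endLabel labels.length labels

-- ===== PORT B =====
-- `boundary = 0; for j, x in enumerate(labels): if x != endLabel: boundary = j + 1`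
-- then `labels[boundary:] = [startLabel] * (len(labels) - boundary); return labels`
def uniteLastWithFirst_py_alt (startLabel : String) (endLabel : String) (labels : List String) : List String :=
  let boundary : Int :=
    (PySem.List.enumerate labels).foldl (fun acc jx => if jx.2 ≠ endLabel then jx.1 + 1 else acc) 0
  labels.take boundary.toNat ++ List.replicate (labels.length - boundary.toNat) startLabel

-- ===== PRECONDITION & SPEC =====
def Spec_uniteLastWithFirst_py (startLabel : String) (endLabel : String) (labels : List String) (out : List String) : Prop := out = uniteLastWithFirst_py_alt startLabel endLabel labels
instance (startLabel : String) (endLabel : String) (labels : List String) (out : List String) : Decidable (Spec_uniteLastWithFirst_py startLabel endLabel labels out) := by unfold Spec_uniteLastWithFirst_py; infer_instance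

-- ===== CLAIM (what is proved, stated in full; the proofs are below) =====
def Claim_equal_uniteLastWithFirst_py : Prop := ∀ (startLabel : String) (endLabel : String) (labels : List String), Dom_uniteLastWithFirst_py startLabel endLabel labels → Spec_uniteLastWithFirst_py startLabel endLabel labels (uniteLastWithFirst_py startLabel endLabel labels)

-- ===== LEMMAS AND PROOFS =====
-- proof-side helper: the boundary A's backward scan stops at
def bGo (endLabel : String) : Nat → List String → Nat
  | 0, _ => 0
  | (k+1), ls => if ls.getD k "" = endLabel then bGo endLabel k ls else k+1

theorem bGo_le (e : String) : ∀ (i : Nat) (ls : List String), bGo e i ls ≤ i := by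
  intro i
  induction i with
  | zero => intro ls; simp [bGo]
  | succ k ih =>
    intro ls
    simp only [bGo]
    split
    · exact Nat.le_trans (ih ls) (Nat.le_succ k)
    · exact Nat.le_refl _

theorem bGo_set (e s : String) : ∀ (j k : Nat) (ls : List String), j ≤ k → bGo e j (ls.set k s) = bGo e j ls := by
  intro j
  induction j with
  | zero => intro k ls _; simp [bGo]
  | succ m ih =>
    intro k ls h
    have hmk : m ≠ k := Nat.ne_of_lt (Nat.lt_of_succ_le h)
    simp only [bGo, List.getD, List.getElem?_set_ne (Ne.symm hmk)]
    by_cases hc : ls[m]?.getD "" = e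
    · simp only [if_pos hc]; exact ih k ls (Nat.le_of_succ_le h)
    · simp only [if_neg hc]

theorem bGo_append (e : String) : ∀ (i : Nat) (ls t : List String), i ≤ ls.length → bGo e i (ls ++ t) = bGo e i ls := by
  intro i
  induction i with
  | zero => intro ls t _; simp [bGo]
  | succ k ih =>
    intro ls t h
    have hk : k < ls.length := Nat.lt_of_succ_le h
    simp only [bGo, List.getD, List.getElem?_append_left hk]
    by_cases hc : ls[k]?.getD "" = e
    · simp only [if_pos hc]; exact ih ls t (Nat.le_of_succ_le h)
    · simp only [if_neg hc]

theorem aGo_eq (s e : String) : ∀ (i : Nat) (ls : List String), i ≤ ls.length →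
    aGo s e i ls = ls.take (bGo e i ls) ++ List.replicate (i - bGo e i ls) s ++ ls.drop i := by
  intro i
  induction i with
  | zero => intro ls _; simp [aGo, bGo]
  | succ k ih =>
    intro ls h
    have hk : k < ls.length := Nat.lt_of_succ_le h
    simp only [aGo, bGo]
    split
    · rename_i heq
      have hlen : (ls.set k s).length = ls.length := by simp
      have ih' := ih (ls.set k s) (by omega)
      rw [ih', bGo_set e s k k ls (Nat.le_refl k)]
      have hb : bGo e k ls ≤ k := bGo_le e k ls
      rw [List.take_set_of_le hb]
      have hdrop : (ls.set k s).drop k = s :: ls.drop (k+1) := by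
        rw [List.drop_eq_getElem_cons (by simpa using hk), List.drop_set_of_lt (Nat.lt_succ_self k)]
        simp
      rw [hdrop]
      have : k + 1 - bGo e k ls = (k - bGo e k ls) + 1 := by omega
      rw [this, List.replicate_succ']
      simp
    · simp

-- the forward-pass boundary of B
def fwd (e : String) (ls : List String) : Int :=
  (PySem.List.enumerate ls).foldl (fun acc jx => if jx.2 ≠ e then jx.1 + 1 else acc) 0

theorem fwd_eq_bGo (e : String) : ∀ (ls : List String), fwd e ls = (bGo e ls.length ls : Nat) := by
  intro ls
  induction ls using List.reverseRecOn with
  | nil => simp [fwd, bGo]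
  | append_singleton ls x ih =>
    have hlen : (ls ++ [x]).length = ls.length + 1 := by simp
    have henum : PySem.List.enumerate (ls ++ [x]) =
        PySem.List.enumerate ls ++ [((ls.length : Int), x)] := by
      rw [PySem.List.enumerate_append]; simp [PySem.List.enumerate]
    have hget : (ls ++ [x]).getD ls.length "" = x := by
      simp [List.getD]
    rw [hlen]
    simp only [fwd, henum, List.foldl_append, List.foldl_cons, List.foldl_nil]
    simp only [bGo, hget]
    by_cases hx : x = e
    · have hb := bGo_append e ls.length ls [x] (Nat.le_refl _)
      rw [hx] at hb
      simp only [hx, hb, ne_eq, not_true_eq_false, if_false, if_true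
]
      simpa [fwd] using ih
    · simp [hx]

-- ===== VERDICT (by name: the statement is the Claim_ definition above) =====
theorem uniteLastWithFirst_py_spec : Claim_equal_uniteLastWithFirst_py := by
  intro s e ls _
  unfold Spec_uniteLastWithFirst_py uniteLastWithFirst_py uniteLastWithFirst_py_alt
  have hf : ((PySem.List.enumerate ls).foldl (fun acc jx => if jx.2 ≠ e then jx.1 + 1 else acc) 0 : Int)
      = (bGo e ls.length ls : Nat) := fwd_eq_bGo e ls
  simp only [hf, Int.toNat_natCast]
  rw [aGo_eq s e ls.length ls (Nat.le_refl _)]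
  simp
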